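-- pv_equiv track=rewrite | github.com/boschresearch/multiosr | multiosr/datasets/utils.py | get_all_attr_cls_ids_list
-- ===== SOURCE A (Python) =====
-- def get_all_attr_cls_ids_list(dataset, ds_attribute_index):
--     num_attributes = len(dataset[0][ds_attribute_index])
--     attr_cls_ids_set_list = [set() for _ in range(num_attributes)]
--     for i in range(len(dataset)):
--         data = dataset[i]
--
--         for j in range(num_attributes):
--             attr_cls_id = int(data[ds_attribute_index][j])
--             attr_cls_ids_set_list[j].add(attr_cls_id)
--
--     attr_cls_ids_list = [sorted(list(attr_cls_ids_set)) for attr_cls_ids_set in attr_cls_ids_set_list]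
--     return attr_cls_ids_list
-- ===== SOURCE B (Python) =====
-- def get_all_attr_cls_ids_list(dataset, ds_attribute_index):
--     num_attributes = len(dataset[0][ds_attribute_index])
--     attr_cls_ids_list = []
--     for j in range(num_attributes):
--         vals = sorted(int(data[ds_attribute_index][j]) for data in dataset)
--         dedup = []
--         for v in vals:
--             if not dedup or dedup[-1] != v:
--                 dedup.append(v)
--         attr_cls_ids_list.append(dedup)
--     return attr_cls_ids_list
-- ===== Notes on version B (the rewrite author's own statement) =====
-- stated objective: alternative
-- what changed: Transposes the loops (per-attribute instead of per-row) and replaces the per-attribute set accumulation with sort-then-scan: all values of an attribute are collected into a plain list, sorted, and deduplicated by a single consecutive-duplicate scan; no set is ever built.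
import Mathlib
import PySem

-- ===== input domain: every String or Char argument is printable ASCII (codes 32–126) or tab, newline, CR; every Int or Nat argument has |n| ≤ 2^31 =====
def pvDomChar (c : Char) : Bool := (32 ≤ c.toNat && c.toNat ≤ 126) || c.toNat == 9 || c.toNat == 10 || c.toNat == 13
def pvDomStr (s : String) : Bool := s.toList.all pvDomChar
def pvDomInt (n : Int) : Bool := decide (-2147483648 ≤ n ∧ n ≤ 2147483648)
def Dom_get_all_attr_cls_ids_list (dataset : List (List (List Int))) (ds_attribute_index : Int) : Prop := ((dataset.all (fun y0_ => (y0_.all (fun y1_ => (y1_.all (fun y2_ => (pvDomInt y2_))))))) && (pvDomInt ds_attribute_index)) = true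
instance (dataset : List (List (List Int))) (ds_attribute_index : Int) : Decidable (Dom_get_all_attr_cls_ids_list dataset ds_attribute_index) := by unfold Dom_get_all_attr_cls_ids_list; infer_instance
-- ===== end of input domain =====

-- B transposes the loops (per-attribute instead of per-row) and replaces the per-attribute set
-- with a plain list that is sorted and then deduplicated by one consecutive-duplicate scan (alternative decomposition).


-- ===== PORT A =====
def get_all_attr_cls_ids_list (dataset : List (List (List Int))) (ds_attribute_index : Int) : List (List Int) :=
  let num_attributes := (PySem.List.pyGetD (PySem.List.pyGetD dataset 0 []) ds_attribute_index []).length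
  let attr_cls_ids_set_list : List (PySem.Set Int) :=
    (PySem.List.pyRange 0 (num_attributes : Int) 1).map (fun _ => PySem.Set.empty)
  let attr_cls_ids_set_list :=
    (PySem.List.pyRange 0 (dataset.length : Int) 1).foldl (fun sets i =>
      let data := PySem.List.pyGetD dataset i []
      (PySem.List.pyRange 0 (num_attributes : Int) 1).foldl (fun sets j =>
        let attr_cls_id := PySem.List.pyGetD (PySem.List.pyGetD data ds_attribute_index []) j 0
        PySem.List.pySetD sets j
          (PySem.Set.add (PySem.List.pyGetD sets j PySem.Set.empty) attr_cls_id)) sets)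
      attr_cls_ids_set_list
  attr_cls_ids_set_list.map (fun s => PySem.List.sorted s (fun x => x) false)

-- ===== PORT B =====
-- the consecutive-duplicate scan over the sorted value list (body of B's inner 'for v in vals' loop)
def pvDedupStep (dedup : List Int) (v : Int) : List Int :=
  if dedup = [] then dedup ++ [v]
  else if PySem.List.pyGetD dedup (-1) 0 ≠ v then dedup ++ [v]
  else dedup

def pvDedupScan (vals : List Int) : List Int := vals.foldl pvDedupStep []

def get_all_attr_cls_ids_list_alt (dataset : List (List (List Int))) (ds_attribute_index : Int) : List (List Int) :=
  let num_attributes := (PySem.List.pyGetD (PySem.List.pyGetD dataset 0 []) ds_attribute_index []).length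
  (PySem.List.pyRange 0 (num_attributes : Int) 1).foldl (fun acc j =>
    let vals := PySem.List.sorted
      (dataset.map (fun data => PySem.List.pyGetD (PySem.List.pyGetD data ds_attribute_index []) j 0))
      (fun x => x) false
    acc ++ [pvDedupScan vals]) []

-- ===== PRECONDITION & SPEC =====
-- Pre_ excludes exactly the inputs where Python A raises IndexError: empty dataset, an attribute
-- index out of range for some record, or a record whose attribute list is shorter than dataset[0]'s.
def Pre_get_all_attr_cls_ids_list (dataset : List (List (List Int))) (ds_attribute_index : Int) : Prop :=
  dataset ≠ [] ∧
  PySem.Raise.InRange (PySem.List.pyGetD dataset 0 []).length ds_attribute_index ∧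
  ((PySem.List.pyGetD (PySem.List.pyGetD dataset 0 []) ds_attribute_index []).length = 0 ∨
    ∀ row ∈ dataset,
      PySem.Raise.InRange row.length ds_attribute_index ∧
      (PySem.List.pyGetD (PySem.List.pyGetD dataset 0 []) ds_attribute_index []).length ≤
        (PySem.List.pyGetD row ds_attribute_index []).length)
instance (dataset : List (List (List Int))) (ds_attribute_index : Int) : Decidable (Pre_get_all_attr_cls_ids_list dataset ds_attribute_index) := by unfold Pre_get_all_attr_cls_ids_list; infer_instance

def pvWitness_get_all_attr_cls_ids_list : List (List (List Int)) × Int := ([[[1, 2]], [[2, 3]]], 0)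

def Spec_get_all_attr_cls_ids_list (dataset : List (List (List Int))) (ds_attribute_index : Int) (out : List (List Int)) : Prop := out = get_all_attr_cls_ids_list_alt dataset ds_attribute_index
instance (dataset : List (List (List Int))) (ds_attribute_index : Int) (out : List (List Int)) : Decidable (Spec_get_all_attr_cls_ids_list dataset ds_attribute_index out) := by unfold Spec_get_all_attr_cls_ids_list; infer_instance

-- ===== CLAIM (what is proved, stated in full; the proofs are below) =====
def Claim_equal_get_all_attr_cls_ids_list : Prop := ∀ (dataset : List (List (List Int))) (ds_attribute_index : Int), Dom_get_all_attr_cls_ids_list dataset ds_attribute_index → Pre_get_all_attr_cls_ids_list dataset ds_attribute_index → Spec_get_all_attr_cls_ids_list dataset ds_attribute_index (get_all_attr_cls_ids_list dataset ds_attribute_index)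

-- ===== LEMMAS AND PROOFS =====

-- two strictly increasing lists with the same members are equal
lemma pv_strict_sorted_eq (l1 l2 : List Int) (h1 : l1.Pairwise (· < ·)) (h2 : l2.Pairwise (· < ·))
    (hm : ∀ x, x ∈ l1 ↔ x ∈ l2) : l1 = l2 := by
  have nd1 : l1.Nodup := h1.imp (fun h => ne_of_lt h)
  have nd2 : l2.Nodup := h2.imp (fun h => ne_of_lt h)
  have hp : l1.Perm l2 := (List.perm_ext_iff_of_nodup nd1 nd2).mpr hm
  calc l1 = PySem.List.sorted l1 (fun x => x) false :=
        (PySem.List.sorted_eq_self_of_pairwise l1 (fun x => x) (h1.imp (fun h => le_of_lt h))).symm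
    _ = PySem.List.sorted l2 (fun x => x) false :=
        PySem.List.sorted_eq_sorted_of_perm l1 l2 (fun x => x) (fun _ _ h => h) hp
    _ = l2 := PySem.List.sorted_eq_self_of_pairwise l2 (fun x => x) (h2.imp (fun h => le_of_lt h))

lemma pv_sorted_nodup_pairwise_lt (s : List Int) (h : s.Nodup) :
    (PySem.List.sorted s (fun x => x) false).Pairwise (· < ·) := by
  have hle := PySem.List.sorted_pairwise s (fun x => x)
  have hnd : (PySem.List.sorted s (fun x => x) false).Nodup :=
    (PySem.List.sorted_perm s (fun x => x) false).nodup_iff.mpr h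
  exact (hle.and hnd).imp (fun h' => lt_of_le_of_ne h'.1 h'.2)

lemma pv_le_getLast_of_pairwise : ∀ (acc : List Int), acc.Pairwise (· ≤ ·) →
    ∀ a ∈ acc, ∀ (hne : acc ≠ []), a ≤ acc.getLast hne := by
  intro acc
  induction acc with
  | nil => intro _ a ha; simp at ha
  | cons x rest ih =>
    intro hp a ha hne
    rcases List.pairwise_cons.mp hp with ⟨hx, hrest⟩
    cases rest with
    | nil => simp at ha ⊢; omega
    | cons y t =>
      rw [List.getLast_cons (by simp)]
      rcases List.mem_cons.mp ha with rfl | hmem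
      · exact hx _ (List.getLast_mem _)
      · exact ih hrest a hmem (by simp)

lemma pv_dedup_invar : ∀ (vals acc : List Int), acc.Pairwise (· < ·) → vals.Pairwise (· ≤ ·) →
    (∀ a ∈ acc, ∀ b ∈ vals, a ≤ b) →
    (vals.foldl pvDedupStep acc).Pairwise (· < ·) ∧
      ∀ x, x ∈ vals.foldl pvDedupStep acc ↔ x ∈ acc ∨ x ∈ vals := by
  intro vals
  induction vals with
  | nil => intro acc hacc _ _; exact ⟨hacc, by simp⟩
  | cons v rest ih =>
    intro acc hacc hv hle
    rcases List.pairwise_cons.mp hv with ⟨hvrest, hrest⟩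
    rw [List.foldl_cons]
    by_cases hnil : acc = []
    · subst hnil
      have step : pvDedupStep [] v = [v] := by simp [pvDedupStep]
      rw [step]
      obtain ⟨hpw, hmem⟩ := ih [v] (by simp) hrest
        (by intro a ha b hb; simp at ha; subst ha; exact hvrest b hb)
      refine ⟨hpw, fun x => ?_⟩
      rw [hmem x]; simp
    · have hlast : acc.getLast hnil ∈ acc := List.getLast_mem hnil
      have hlv : acc.getLast hnil ≤ v := hle _ hlast v (by simp)
      by_cases heq : PySem.List.pyGetD acc (-1) 0 = v
      · have step : pvDedupStep acc v = acc := by simp [pvDedupStep, hnil, heq]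
        rw [step]
        have hvmem : v ∈ acc := by
          rw [← heq, PySem.List.pyGetD_neg_one acc 0 hnil]; exact hlast
        obtain ⟨hpw, hmem⟩ := ih acc hacc hrest
          (by intro a ha b hb; exact hle a ha b (by simp [hb]))
        refine ⟨hpw, fun x => ?_⟩
        rw [hmem x]
        constructor
        · rintro (h | h)
          · exact Or.inl h
          · exact Or.inr (List.mem_cons_of_mem v h)
        · rintro (h | h)
          · exact Or.inl h
          · rcases List.mem_cons.mp h with rfl | h'
            · exact Or.inl hvmem
            · exact Or.inr h'
      · have hlv' : acc.getLast hnil < v := by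
          rw [PySem.List.pyGetD_neg_one acc 0 hnil] at heq
          exact lt_of_le_of_ne hlv heq
        have step : pvDedupStep acc v = acc ++ [v] := by
          simp only [pvDedupStep, hnil, if_false, heq, ne_eq, not_false_iff, if_true]
        rw [step]
        have hpw' : (acc ++ [v]).Pairwise (· < ·) := by
          rw [List.pairwise_append]
          refine ⟨hacc, by simp, ?_⟩
          intro a ha b hb; simp at hb; subst hb
          exact lt_of_le_of_lt (pv_le_getLast_of_pairwise acc (hacc.imp (fun h => le_of_lt h)) a ha hnil) hlv'
        obtain ⟨hpw, hmem⟩ := ih (acc ++ [v]) hpw' hrest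
          (by intro a ha b hb
              rcases List.mem_append.mp ha with h | h
              · exact hle a h b (by simp [hb])
              · simp at h; subst h; exact hvrest b hb)
        refine ⟨hpw, fun x => ?_⟩
        rw [hmem x]; simp; tauto

-- length of the inner per-row loop's state is preserved
lemma pv_inner_len (m : Nat) (f : Int → Int) (sets : List (PySem.Set Int)) :
    ((PySem.List.pyRange 0 (m : Int) 1).foldl (fun s j =>
      PySem.List.pySetD s j (PySem.Set.add (PySem.List.pyGetD s j PySem.Set.empty) (f j))) sets).length
    = sets.length := by
  induction m generalizing sets with
  | zero => simp [PySem.List.pyRange_one_eq_nil]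
  | succ k ih =>
    rw [show ((k + 1 : Nat) : Int) = (k : Int) + 1 by push_cast; ring,
        PySem.List.pyRange_one_succ_right (by positivity), List.foldl_append,
        List.foldl_cons, List.foldl_nil, PySem.List.length_pySetD]
    exact ih sets

-- pointwise characterisation of the inner per-row loop
lemma pv_inner_get (m : Nat) (f : Int → Int) (sets : List (PySem.Set Int)) (hm : m ≤ sets.length)
    (j : Nat) :
    ((PySem.List.pyRange 0 (m : Int) 1).foldl (fun s j =>
      PySem.List.pySetD s j (PySem.Set.add (PySem.List.pyGetD s j PySem.Set.empty) (f j))) sets)[j]?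
    = if j < m then (sets[j]?).map (fun s => PySem.Set.add s (f j)) else sets[j]? := by
  induction m generalizing j with
  | zero => simp [PySem.List.pyRange_one_eq_nil]
  | succ k ih =>
    rw [show ((k + 1 : Nat) : Int) = (k : Int) + 1 by push_cast; ring,
        PySem.List.pyRange_one_succ_right (by positivity), List.foldl_append]
    simp only [List.foldl_cons, List.foldl_nil]
    set prev := (PySem.List.pyRange 0 (k : Int) 1).foldl (fun s j =>
      PySem.List.pySetD s j (PySem.Set.add (PySem.List.pyGetD s j PySem.Set.empty) (f j))) sets with hprev
    have hplen : prev.length = sets.length := pv_inner_len k f sets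
    have hkp : (prev[k]?) = sets[k]? := by rw [ih (by omega) k]; simp
    have hks : sets[k]? = some (sets[k]'(by omega)) := List.getElem?_eq_getElem (by omega)
    have hget : PySem.List.pyGetD prev (k : Int) PySem.Set.empty = sets[k]'(by omega) := by
      rw [PySem.List.pyGetD_natCast, List.getD_eq_getElem?_getD, hkp, hks]; rfl
    rw [PySem.List.pySetD_natCast, hget]
    rcases Nat.lt_trichotomy j k with hjk | rfl | hjk
    · rw [List.getElem?_set_ne (by omega), ih (by omega) j]
      simp [Nat.lt_of_lt_of_le hjk (Nat.le_succ k), hjk]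
    · rw [List.getElem?_set_self (by omega)]
      simp [hks]
    · rw [List.getElem?_set_ne (by omega), ih (by omega) j]
      have h1 : ¬ j < k := by omega
      have h2 : ¬ j < k + 1 := by omega
      simp [h1, h2]

-- pointwise characterisation of the outer loop over the rows
lemma pv_outer_get (n : Nat) (g : List (List Int) → Int → Int) :
    ∀ (rows : List (List (List Int))) (sets : List (PySem.Set Int)), n ≤ sets.length →
    ∀ j : Nat,
    (rows.foldl (fun sets data =>
      (PySem.List.pyRange 0 (n : Int) 1).foldl (fun s j =>
        PySem.List.pySetD s j (PySem.Set.add (PySem.List.pyGetD s j PySem.Set.empty) (g data j))) sets) sets)[j]?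
    = if j < n then (sets[j]?).map (fun s => rows.foldl (fun s data => PySem.Set.add s (g data (j : Int))) s)
      else sets[j]? := by
  intro rows
  induction rows with
  | nil => intro sets _ j; simp
  | cons r rest ih =>
    intro sets hn j
    rw [List.foldl_cons]
    rw [ih _ (by rw [pv_inner_len]; exact hn) j]
    rw [pv_inner_get n (g r) sets hn j]
    by_cases hj : j < n
    · simp only [hj, if_true, Option.map_map]
      cases sets[j]? <;> simp [Function.comp]
    · simp [hj]

lemma pv_mem_foldl_add (f : List (List Int) → Int) :
    ∀ (rows : List (List (List Int))) (s : PySem.Set Int) (x : Int),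
    x ∈ rows.foldl (fun s data => PySem.Set.add s (f data)) s ↔ x ∈ s ∨ x ∈ rows.map f := by
  intro rows
  induction rows with
  | nil => simp
  | cons r rest ih =>
    intro s x
    rw [List.foldl_cons, ih, PySem.Set.mem_add]
    simp; tauto

lemma pv_nodup_foldl_add (f : List (List Int) → Int) :
    ∀ (rows : List (List (List Int))) (s : PySem.Set Int), s.Nodup →
    (rows.foldl (fun s data => PySem.Set.add s (f data)) s).Nodup := by
  intro rows
  induction rows with
  | nil => intro s hs; exact hs
  | cons r rest ih => intro s hs; exact ih _ (PySem.Set.nodup_add s (f r) hs)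

-- ===== VERDICT (by name: the statement is the Claim_ definition above) =====
theorem get_all_attr_cls_ids_list_spec : Claim_equal_get_all_attr_cls_ids_list := by
  intro dataset ds_attribute_index _ _
  unfold Spec_get_all_attr_cls_ids_list get_all_attr_cls_ids_list get_all_attr_cls_ids_list_alt
  simp only []
  set n := (PySem.List.pyGetD (PySem.List.pyGetD dataset 0 []) ds_attribute_index []).length with hn
  -- B's result loop is a map over the attribute indices
  rw [PySem.List.foldl_append_singleton_eq_map, List.nil_append]
  -- A's outer loop over row indices is a fold over the rows
  rw [PySem.List.foldl_pyRange_zero_pyGetD' dataset []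
    (fun sets data => (PySem.List.pyRange 0 (n : Int) 1).foldl (fun sets j =>
      PySem.List.pySetD sets j (PySem.Set.add (PySem.List.pyGetD sets j PySem.Set.empty)
        (PySem.List.pyGetD (PySem.List.pyGetD data ds_attribute_index []) j 0))) sets)]
  apply List.ext_getElem?
  intro k
  have hinitlen : ((PySem.List.pyRange 0 (n : Int) 1).map
      (fun _ => (PySem.Set.empty : PySem.Set Int))).length = n := by
    simp [PySem.List.length_pyRange_one]
  rw [List.getElem?_map, List.getElem?_map,
    pv_outer_get n (fun data j => PySem.List.pyGetD (PySem.List.pyGetD data ds_attribute_index []) j 0)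
      dataset _ (by omega) k]
  by_cases hk : k < n
  · have hinit : ((PySem.List.pyRange 0 (n : Int) 1).map
        (fun _ => (PySem.Set.empty : PySem.Set Int)))[k]? = some PySem.Set.empty := by
      rw [List.getElem?_map, PySem.List.getElem?_pyRange_one]
      simp [hk]
    rw [hinit]
    have hrk : (PySem.List.pyRange 0 (n : Int) 1)[k]? = some ((k : Int)) := by
      rw [PySem.List.getElem?_pyRange_one]; simp [hk]
    rw [hrk]
    simp only [hk, if_true, Option.map_some]
    congr 1
    -- per-attribute equality: sorted set  =  dedup-scan of sorted list
    set f : List (List Int) → Int := fun data =>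
      PySem.List.pyGetD (PySem.List.pyGetD data ds_attribute_index []) (k : Int) 0 with hf
    set S : PySem.Set Int := dataset.foldl (fun s data => PySem.Set.add s (f data)) PySem.Set.empty with hS
    set L : List Int := dataset.map f with hL
    have hSnd : S.Nodup := pv_nodup_foldl_add f dataset PySem.Set.empty List.nodup_nil
    obtain ⟨hpw, hmem⟩ := pv_dedup_invar (PySem.List.sorted L (fun x => x) false) []
      (by simp) (PySem.List.sorted_pairwise L (fun x => x)) (by simp)
    apply pv_strict_sorted_eq _ _ (pv_sorted_nodup_pairwise_lt S hSnd) hpw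
    intro x
    rw [PySem.List.mem_sorted, hmem x, PySem.List.mem_sorted]
    rw [hS, pv_mem_foldl_add f dataset PySem.Set.empty x]
    simp [PySem.Set.empty, hL]
  · have hinit : ((PySem.List.pyRange 0 (n : Int) 1).map
        (fun _ => (PySem.Set.empty : PySem.Set Int)))[k]? = none := by
      rw [List.getElem?_map, PySem.List.getElem?_pyRange_one]
      simp [hk]
    have hrk : (PySem.List.pyRange 0 (n : Int) 1)[k]? = none := by
      rw [PySem.List.getElem?_pyRange_one]; simp [hk]
    rw [hinit, hrk]
    simp [hk]
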